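-- pv_equiv track=rewrite | github.com/rcalfredson/flygen-ml | src/flygen_ml/modeling/train.py | _prediction_fieldnames
-- ===== SOURCE A (Python) =====
-- def _prediction_fieldnames(rows: list[dict[str, object]]) -> list[str]:
--     fieldnames = [
--         "split",
--         "fly_id",
--         "sample_key",
--         "label_key",
--         "actual_label",
--         "predicted_label",
--         "predicted_probability",
--         "n_segments",
--         "n_segments_with_qc_flags",
--         "evidence_bin",
--     ]
--     if any("fold" in row for row in rows):
--         fieldnames.insert(0, "fold")
--     if any("actual_genotype" in row for row in rows):
--         insert_at = fieldnames.index("predicted_probability")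
--         fieldnames[insert_at:insert_at] = ["actual_genotype", "predicted_genotype"]
--     return fieldnames
-- ===== SOURCE B (Python) =====
-- def _prediction_fieldnames(rows: list[dict[str, object]]) -> list[str]:
--     has_fold = False
--     has_genotype = False
--     for row in rows:
--         if "fold" in row:
--             has_fold = True
--         if "actual_genotype" in row:
--             has_genotype = True
--         if has_fold and has_genotype:
--             break
--     return (
--         (["fold"] if has_fold else [])
--         + [
--             "split",
--             "fly_id",
--             "sample_key",
--             "label_key",
--             "actual_label",
--             "predicted_label",
--         ]
--         + (["actual_genotype", "predicted_genotype"] if has_genotype else [])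
--         + [
--             "predicted_probability",
--             "n_segments",
--             "n_segments_with_qc_flags",
--             "evidence_bin",
--         ]
--     )
-- ===== Notes on version B (the rewrite author's own statement) =====
-- stated objective: alternative
-- what changed: Replaces the two separate any(...) scans plus post-hoc insert/splice edits with a single early-exiting pass that sets two flags, then builds the fieldname list in one shaped concatenation.
import Mathlib
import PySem

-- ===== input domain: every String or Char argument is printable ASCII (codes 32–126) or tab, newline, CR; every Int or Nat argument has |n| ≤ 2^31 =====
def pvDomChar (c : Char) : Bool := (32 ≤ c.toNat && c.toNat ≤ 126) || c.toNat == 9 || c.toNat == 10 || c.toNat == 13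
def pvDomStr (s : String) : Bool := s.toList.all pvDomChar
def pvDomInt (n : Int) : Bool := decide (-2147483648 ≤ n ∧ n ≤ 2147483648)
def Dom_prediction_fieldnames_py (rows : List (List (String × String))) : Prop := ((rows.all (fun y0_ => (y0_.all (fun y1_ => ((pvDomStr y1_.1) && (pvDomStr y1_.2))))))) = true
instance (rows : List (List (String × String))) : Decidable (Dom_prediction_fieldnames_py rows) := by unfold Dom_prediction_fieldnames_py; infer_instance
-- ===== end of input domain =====

-- ===== PORT A =====
-- B builds the fieldname list in one shaped concatenation from two flags found in a
-- single early-exiting pass, instead of A's two any-scans plus insert/splice edits.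

-- `"k" in row` on a Python dict = some pair in the association list has key "k"
def pvHasKey (row : List (String × String)) (k : String) : Bool :=
  row.any (fun kv => kv.1 == k)

def prediction_fieldnames_py (rows : List (List (String × String))) : List String :=
  let fieldnames : List String :=
    ["split", "fly_id", "sample_key", "label_key", "actual_label", "predicted_label",
     "predicted_probability", "n_segments", "n_segments_with_qc_flags", "evidence_bin"]
  let fieldnames :=
    if rows.any (fun row => pvHasKey row "fold") then
      PySem.List.insert fieldnames 0 "fold"   -- fieldnames.insert(0, "fold")
    else fieldnames
  if rows.any (fun row => pvHasKey row "actual_genotype") then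
    -- "predicted_probability" is always present, so .index cannot raise; getD 0 is unreachable
    let insert_at := (PySem.List.index? fieldnames "predicted_probability").getD 0
    -- fieldnames[insert_at:insert_at] = ["actual_genotype", "predicted_genotype"]
    fieldnames.take insert_at ++ ["actual_genotype", "predicted_genotype"] ++ fieldnames.drop insert_at
  else fieldnames

-- ===== PORT B =====
-- one pass over rows, breaking out early once both flags are set
def pvScanFlags : List (List (String × String)) → Bool → Bool → Bool × Bool
  | [], hf, hg => (hf, hg)
  | row :: rest, hf, hg =>
    let hf := hf || pvHasKey row "fold"
    let hg := hg || pvHasKey row "actual_genotype"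
    if hf && hg then (hf, hg) else pvScanFlags rest hf hg

def prediction_fieldnames_py_alt (rows : List (List (String × String))) : List String :=
  let flags := pvScanFlags rows false false
  (if flags.1 then ["fold"] else [])
    ++ ["split", "fly_id", "sample_key", "label_key", "actual_label", "predicted_label"]
    ++ (if flags.2 then ["actual_genotype", "predicted_genotype"] else [])
    ++ ["predicted_probability", "n_segments", "n_segments_with_qc_flags", "evidence_bin"]

-- ===== PRECONDITION & SPEC =====
def Spec_prediction_fieldnames_py (rows : List (List (String × String))) (out : List String) : Prop := out = prediction_fieldnames_py_alt rows
instance (rows : List (List (String × String))) (out : List String) : Decidable (Spec_prediction_fieldnames_py rows out) := by unfold Spec_prediction_fieldnames_py; infer_instance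

-- ===== CLAIM (what is proved, stated in full; the proofs are below) =====
def Claim_equal_prediction_fieldnames_py : Prop := ∀ (rows : List (List (String × String))), Dom_prediction_fieldnames_py rows → Spec_prediction_fieldnames_py rows (prediction_fieldnames_py rows)

-- ===== LEMMAS AND PROOFS =====

theorem pvScanFlags_eq (rows : List (List (String × String))) (hf hg : Bool) :
    pvScanFlags rows hf hg =
      (hf || rows.any (fun row => pvHasKey row "fold"),
       hg || rows.any (fun row => pvHasKey row "actual_genotype")) := by
  induction rows generalizing hf hg with
  | nil => simp [pvScanFlags]
  | cons row rest ih =>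
    simp only [pvScanFlags, List.any_cons]
    split
    · next h =>
      simp only [Bool.and_eq_true] at h
      simp only [← Bool.or_assoc, h.1, h.2, Bool.true_or]
    · rw [ih]
      simp [Bool.or_assoc]

-- ===== VERDICT (by name: the statement is the Claim_ definition above) =====
theorem prediction_fieldnames_py_spec : Claim_equal_prediction_fieldnames_py := by
  intro rows _
  unfold Spec_prediction_fieldnames_py prediction_fieldnames_py prediction_fieldnames_py_alt
  rw [pvScanFlags_eq]
  cases hf : rows.any (fun row => pvHasKey row "fold") <;>
    cases hg : rows.any (fun row => pvHasKey row "actual_genotype") <;> rfl
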